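-- pv_equiv track=rewrite | github.com/MrBrantCode/unitest_baseline | mut_generate/mist_train_taco/taco_2104/solution.py | generate_min_product_of_digits
-- ===== SOURCE A (Python) =====
-- def generate_min_product_of_digits(N, S):
--     # Check if the sum of digits S can be achieved with N digits
--     if S > 9 * N:
--         return -1
--
--     # Special case when N is 1
--     if N == 1:
--         return S
--
--     # Initialize the product to 1 (since multiplying by 1 doesn't change the product)
--     product = 1
--
--     # Distribute the sum S among N digits to minimize the product
--     for i in range(N):
--         if S > 9:
--             digit = 9
--             S -= 9
--         else:
--             digit = S
--             S = 0
--         product *= digit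
--
--     # If there is any remaining sum, it means we couldn't distribute it properly
--     if S > 0:
--         return -1
--
--     return product
-- ===== SOURCE B (Python) =====
-- def generate_min_product_of_digits(N, S):
--     # Closed-form: O(log S) instead of A's O(N) loop.
--     if S > 9 * N:
--         return -1
--     if N == 1:
--         return S
--     if N <= 0:
--         return 1
--     if S <= 0:
--         # first digit is S (<= 0), the remaining N-1 >= 1 digits are 0
--         return 0
--     q, rm = divmod(S - 1, 9)      # q nines followed by digit rm+1, then zeros
--     if q + 1 < N:
--         return 0                  # some digit is 0
--     return 9 ** q * (rm + 1)
-- ===== Notes on version B (the rewrite author's own statement) =====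
-- stated objective: faster
-- what changed: Replaced the O(N) digit-distribution loop with closed-form arithmetic: q,r = divmod(S-1,9) give the digit multiset directly, so the result is 9**q*(r+1) when the nines-plus-remainder fill all N slots and 0 when a zero digit remains.
import Mathlib
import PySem

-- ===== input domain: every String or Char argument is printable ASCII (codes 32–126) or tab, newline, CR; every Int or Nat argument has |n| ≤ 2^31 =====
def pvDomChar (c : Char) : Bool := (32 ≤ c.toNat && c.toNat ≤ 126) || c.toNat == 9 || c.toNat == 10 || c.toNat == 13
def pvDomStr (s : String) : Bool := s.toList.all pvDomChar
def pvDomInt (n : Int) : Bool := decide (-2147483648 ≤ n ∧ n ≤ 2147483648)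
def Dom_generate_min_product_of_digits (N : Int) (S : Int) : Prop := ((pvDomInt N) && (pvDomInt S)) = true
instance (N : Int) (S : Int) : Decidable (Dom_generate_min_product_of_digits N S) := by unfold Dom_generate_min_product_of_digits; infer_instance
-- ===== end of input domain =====

-- B replaces A's O(N) digit-distribution loop by closed-form arithmetic (divmod + power); faster.

-- ===== PORT A =====
-- literal transliteration of A: the for-loop over range(N) carrying (S, product)
def generate_min_product_of_digits (N : Int) (S : Int) : Int :=
  if S > 9 * N then -1
  else if N = 1 then S
  else
    let st := (PySem.List.pyRange 0 N 1).foldl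
      (fun (sp : Int × Int) _ =>
        if sp.1 > 9 then (sp.1 - 9, sp.2 * 9) else ((0 : Int), sp.2 * sp.1))
      (S, 1)
    if st.1 > 0 then -1 else st.2

-- ===== PORT B =====
-- literal transliteration of Source B: closed-form via divmod(S-1, 9)
def generate_min_product_of_digits_alt (N : Int) (S : Int) : Int :=
  if S > 9 * N then -1
  else if N = 1 then S
  else if N ≤ 0 then 1
  else if S ≤ 0 then 0
  else
    let q := PySem.Int.floordiv (S - 1) 9
    let rm := PySem.Int.mod (S - 1) 9
    if q + 1 < N then 0
    else 9 ^ q.toNat * (rm + 1)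

-- ===== PRECONDITION & SPEC =====
def Spec_generate_min_product_of_digits (N : Int) (S : Int) (out : Int) : Prop := out = generate_min_product_of_digits_alt N S
instance (N : Int) (S : Int) (out : Int) : Decidable (Spec_generate_min_product_of_digits N S out) := by unfold Spec_generate_min_product_of_digits; infer_instance

-- ===== CLAIM (what is proved, stated in full; the proofs are below) =====
def Claim_equal_generate_min_product_of_digits : Prop := ∀ (N : Int) (S : Int), Dom_generate_min_product_of_digits N S → Spec_generate_min_product_of_digits N S (generate_min_product_of_digits N S)

-- ===== LEMMAS AND PROOFS =====

-- A's loop body, iterated n times on state (S, product); the loop ignores the index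
def pvLoopA : Nat → Int → Int → Int × Int
  | 0, s, p => (s, p)
  | n + 1, s, p => if s > 9 then pvLoopA n (s - 9) (p * 9) else pvLoopA n 0 (p * s)

theorem pvFoldl_eq_loopA (l : List Int) (s p : Int) :
    l.foldl (fun (sp : Int × Int) _ =>
        if sp.1 > 9 then (sp.1 - 9, sp.2 * 9) else ((0 : Int), sp.2 * sp.1)) (s, p)
      = pvLoopA l.length s p := by
  induction l generalizing s p with
  | nil => rfl
  | cons a t ih =>
      simp only [List.foldl_cons, List.length_cons, pvLoopA]
      split_ifs with h <;> simp_all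

theorem pvLoopA_zero (n : Nat) (p : Int) : pvLoopA n 0 p = (0, if n = 0 then p else 0) := by
  induction n generalizing p with
  | zero => rfl
  | succ k ih =>
      simp only [pvLoopA, show ¬ ((0:Int) > 9) by decide, mul_zero]
      rw [ih]
      cases k <;> simp

-- closed form for the loop on a positive feasible sum
theorem pvLoopA_pos (n : Nat) (s p : Int) (h1 : 1 ≤ n) (h2 : 0 < s) (h3 : s ≤ 9 * n) :
    pvLoopA n s p =
      (0, p * (if (s - 1) / 9 + 1 < (n : Int) then 0 else 9 ^ ((s - 1) / 9).toNat * ((s - 1) % 9 + 1))) := by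
  induction n generalizing s p with
  | zero => omega
  | succ k ih =>
      by_cases hk : k = 0
      · subst hk
        have hs9 : ¬ s > 9 := by push_cast at h3; omega
        simp only [pvLoopA, if_neg hs9]
        have hq : (s - 1) / 9 = 0 := by omega
        have hr : (s - 1) % 9 = s - 1 := by omega
        have hc : ¬ ((s - 1) / 9 + 1 < (((0 : Nat) : Int) + 1)) := by omega
        push_cast at hc ⊢
        rw [if_neg hc, hq, hr]
        norm_num
      · have hk1 : 1 ≤ k := by omega
        by_cases hs : s > 9
        · simp only [pvLoopA, if_pos hs]
          rw [ih (s - 9) (p * 9) hk1 (by omega) (by push_cast at h3 ⊢; omega)]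
          have hq : (s - 1) / 9 = (s - 9 - 1) / 9 + 1 := by omega
          have hr : (s - 1) % 9 = (s - 9 - 1) % 9 := by omega
          have hcond : ((s - 1) / 9 + 1 < ((k : Int) + 1)) ↔ ((s - 9 - 1) / 9 + 1 < (k : Int)) := by omega
          have htn : ((s - 1) / 9).toNat = ((s - 9 - 1) / 9).toNat + 1 := by omega
          push_cast
          rw [hq, hr] at *
          split_ifs with h h' h'
          · ring
          · omega
          · omega
          · rw [htn, pow_succ]; ring
        · simp only [pvLoopA, if_neg hs]
          rw [pvLoopA_zero]
          have hq : (s - 1) / 9 = 0 := by omega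
          have : ((s - 1) / 9 + 1 < ((k : Int) + 1)) := by omega
          push_cast
          simp [hk, this]

theorem pvFloordiv9 (a : Int) : PySem.Int.floordiv a 9 = a / 9 :=
  PySem.Int.floordiv_eq_ediv_of_pos (by norm_num)

theorem pvMod9 (a : Int) : PySem.Int.mod a 9 = a % 9 :=
  PySem.Int.mod_eq_emod_of_pos (by norm_num)

-- ===== VERDICT (by name: the statement is the Claim_ definition above) =====
theorem generate_min_product_of_digits_spec : Claim_equal_generate_min_product_of_digits := by
  intro N S _
  unfold Spec_generate_min_product_of_digits generate_min_product_of_digits generate_min_product_of_digits_alt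
  by_cases h1 : S > 9 * N
  · simp [h1]
  · simp only [if_neg h1]
    by_cases h2 : N = 1
    · simp [h2]
    · simp only [if_neg h2]
      rw [pvFoldl_eq_loopA, PySem.List.length_pyRange_one]
      by_cases h3 : N ≤ 0
      · have : (N - 0).toNat = 0 := by omega
        rw [this]
        have : ¬ S > 0 := by omega
        simp [pvLoopA, this, h3]
      · simp only [if_neg h3]
        have hn1 : 1 ≤ (N - 0).toNat := by omega
        by_cases h4 : S ≤ 0
        · -- first digit is S ≤ 0, then zeros: product 0
          obtain ⟨k, hk⟩ : ∃ k, (N - 0).toNat = k + 1 := ⟨(N - 0).toNat - 1, by omega⟩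
          have hk1 : 1 ≤ k := by omega
          rw [hk]
          have hs9 : ¬ S > 9 := by omega
          simp only [pvLoopA, if_neg hs9, one_mul]
          rw [pvLoopA_zero]
          simp [h4, show k ≠ 0 by omega]
        · simp only [if_neg h4]
          have hb : S ≤ 9 * (((N - 0).toNat : Nat) : Int) := by omega
          rw [pvLoopA_pos _ _ _ hn1 (by omega) hb]
          rw [pvFloordiv9, pvMod9]
          have hcast : ((N - 0).toNat : Int) = N := by omega
          rw [hcast]
          simp only [one_mul]
          split_ifs <;> first | rfl | omega
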